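-- pv_equiv track=rewrite | github.com/rsbrian/poseNet | behavior/test.py | calc_scope
-- ===== SOURCE A (Python) =====
-- def calc_scope(gradients):
--     s = 0
--     p = gradients[0]
--     for gradient in gradients[1:]:
--         s += (gradient - p)
--         p = gradient
--     if s > 0:
--         return "先負再正"
--     else:
--         return "先正再負"
-- ===== SOURCE B (Python) =====
-- def calc_scope(gradients):
--     # telescoping: the sum of consecutive differences equals last element minus first
--     if gradients[-1] - gradients[0] > 0:
--         return "先負再正"
--     return "先正再負"
-- ===== Notes on version B (the rewrite author's own statement) =====
-- stated objective: faster
-- what changed: Replaces the O(n) loop summing consecutive differences with the telescoped closed form (last element - first element).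
import Mathlib
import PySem

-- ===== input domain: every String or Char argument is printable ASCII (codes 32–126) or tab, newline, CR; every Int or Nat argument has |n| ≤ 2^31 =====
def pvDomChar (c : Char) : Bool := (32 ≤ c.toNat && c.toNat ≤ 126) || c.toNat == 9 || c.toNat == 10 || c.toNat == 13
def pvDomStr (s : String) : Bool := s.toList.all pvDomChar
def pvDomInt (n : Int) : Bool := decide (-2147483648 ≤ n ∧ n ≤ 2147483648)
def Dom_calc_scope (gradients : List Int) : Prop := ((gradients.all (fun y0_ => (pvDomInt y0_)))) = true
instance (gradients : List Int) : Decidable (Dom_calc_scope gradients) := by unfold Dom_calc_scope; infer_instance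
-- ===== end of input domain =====

-- B replaces A's loop summing consecutive differences by the telescoped closed form
-- (last element minus first element); both raise IndexError on the empty list, excluded by Pre_.

-- ===== PORT A =====
-- A: s = 0; p = gradients[0]; for g in gradients[1:]: s += g - p; p = g; then sign test.
def calc_scope (gradients : List Int) : String :=
  match gradients with
  | [] => ""  -- A raises IndexError here; excluded by Pre_calc_scope
  | p :: rest =>
    let sp := rest.foldl (fun (sp : Int × Int) g => (sp.1 + (g - sp.2), g)) ((0 : Int), p)
    if sp.1 > 0 then "先負再正" else "先正再負"

-- ===== PORT B =====
-- B: last element minus first element > 0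
def calc_scope_alt (gradients : List Int) : String :=
  match gradients with
  | [] => ""  -- B raises IndexError here too; excluded by Pre_calc_scope
  | p :: rest =>
    if rest.getLastD p - p > 0 then "先負再正" else "先正再負"

-- ===== PRECONDITION & SPEC =====
-- A raises IndexError on the empty list (indexing the first element); Pre_ excludes exactly that input.
def Pre_calc_scope (gradients : List Int) : Prop := gradients ≠ []
instance (gradients : List Int) : Decidable (Pre_calc_scope gradients) := by unfold Pre_calc_scope; infer_instance
def pvWitness_calc_scope : List Int := ([1, 3, 2])

def Spec_calc_scope (gradients : List Int) (out : String) : Prop := out = calc_scope_alt gradients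
instance (gradients : List Int) (out : String) : Decidable (Spec_calc_scope gradients out) := by unfold Spec_calc_scope; infer_instance

-- ===== CLAIM (what is proved, stated in full; the proofs are below) =====
def Claim_equal_calc_scope : Prop := ∀ (gradients : List Int), Dom_calc_scope gradients → Pre_calc_scope gradients → Spec_calc_scope gradients (calc_scope gradients)

-- ===== LEMMAS AND PROOFS =====
-- the loop's accumulated sum telescopes to (last element) - (initial p)
theorem calc_scope_fold_telescope (rest : List Int) (s p : Int) :
    (rest.foldl (fun (sp : Int × Int) g => (sp.1 + (g - sp.2), g)) (s, p)).1
      = s + (rest.getLastD p - p) := by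
  induction rest generalizing s p with
  | nil => simp
  | cons g t ih =>
    simp [List.foldl, ih]
    cases t with
    | nil => simp
    | cons h tl =>
      obtain ⟨x, hx⟩ := Option.isSome_iff_exists.mp (List.getLast?_isSome.mpr (List.cons_ne_nil h tl))
      simp [hx]; ring

-- ===== VERDICT (by name: the statement is the Claim_ definition above) =====
theorem calc_scope_spec : Claim_equal_calc_scope := by
  intro gradients _ hpre
  unfold Spec_calc_scope calc_scope calc_scope_alt
  match gradients with
  | [] => exact absurd rfl hpre
  | p :: rest =>
    simp only [calc_scope_fold_telescope, zero_add]
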